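-- pv_equiv track=rewrite | github.com/mymmym1/Python | Computational Biology/Algorithms for DNA Sequencing/week3/editDistanceDP.py | editDistancePinT
-- ===== SOURCE A (Python) =====
-- def editDistancePinT(x, y):
--     D = []
--     for i in range(len(x)+1):  # Initialize matrix
--         D.append([0]*(len(y)+1))
--     for i in range(len(x)+1):
--         D[i][0] = i  # Initialize the first column values = the number of x index
--     for i in range(len(y)+1):
--         D[0][i] = 0   # Initialize first row values = 0, because we don't know where p happens in T
--     # Fill in the rest of the matrix
--     for i in range(1, len(x)+1):
--         for j in range(1, len(y)+1):
--             distHor = D[i][j-1] + 1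
--             distVer = D[i-1][j] + 1
--             if x[i-1] == y[j-1]:
--                 distDiag = D[i-1][j-1]
--             else:
--                 distDiag = D[i-1][j-1] + 1
--             D[i][j] = min(distHor, distVer, distDiag)
--     # So far we don't know the value in each position until we fill them with 2 sequences' comparison result
--     return min(D[-1])  # Edit distance is the min value in the last row of the matrix
-- ===== SOURCE B (Python) =====
-- def editDistancePinT(x, y):
--     # Top-down memoized recursion on (i, j) instead of A's materialized bottom-up matrix.
--     memo = {}
--
--     def d(i, j):
--         if (i, j) in memo:
--             return memo[(i, j)]
--         if i == 0:
--             v = 0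
--         elif j == 0:
--             v = i
--         else:
--             v = min(d(i, j - 1) + 1, d(i - 1, j) + 1,
--                     d(i - 1, j - 1) + (1 if x[i - 1] != y[j - 1] else 0))
--         memo[(i, j)] = v
--         return v
--
--     return min(d(len(x), j) for j in range(len(y) + 1))
-- ===== Notes on version B (the rewrite author's own statement) =====
-- stated objective: alternative
-- what changed: Replaces A's bottom-up fully materialized (m+1)x(n+1) matrix with three initialization passes by top-down memoized recursion: a helper d(i,j) evaluates the same recurrence on demand, caching results in a dict, and the answer is min(d(m,j) for j in 0..n).
import Mathlib
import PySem

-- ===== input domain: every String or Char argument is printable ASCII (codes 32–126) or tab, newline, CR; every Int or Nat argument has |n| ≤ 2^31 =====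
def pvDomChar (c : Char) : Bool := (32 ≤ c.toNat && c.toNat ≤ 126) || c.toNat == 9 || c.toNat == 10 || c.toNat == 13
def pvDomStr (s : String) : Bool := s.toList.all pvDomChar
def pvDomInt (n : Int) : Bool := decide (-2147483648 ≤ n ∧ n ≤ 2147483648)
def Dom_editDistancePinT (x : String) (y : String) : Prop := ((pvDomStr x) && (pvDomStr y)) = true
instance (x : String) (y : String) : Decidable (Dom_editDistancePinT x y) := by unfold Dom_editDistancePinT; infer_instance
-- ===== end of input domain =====

-- B replaces A's bottom-up materialized (m+1)x(n+1) matrix by top-down memoized recursion on (i, j)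
-- with a dict cache (alternative decomposition); return values are proved equal.

-- ===== PORT A =====
-- D[i][j] read (the Python indices here are always in range)
def pvGet2 (D : List (List Int)) (i j : Int) : Int :=
  PySem.List.pyGetD (PySem.List.pyGetD D i []) j 0

-- D[i][j] = v (the Python indices here are always in range)
def pvSet2 (D : List (List Int)) (i j : Int) (v : Int) : List (List Int) :=
  PySem.List.pySetD D i (PySem.List.pySetD (PySem.List.pyGetD D i []) j v)

def editDistancePinT (x : String) (y : String) : Int :=
  let xs := x.toList
  let ys := y.toList
  -- D = []; for i in range(len(x)+1): D.append([0]*(len(y)+1))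
  let D : List (List Int) :=
    (PySem.List.pyRange 0 (xs.length + 1) 1).foldl
      (fun D _ => D ++ [List.replicate (ys.length + 1) (0 : Int)]) []
  -- for i in range(len(x)+1): D[i][0] = i
  let D := (PySem.List.pyRange 0 (xs.length + 1) 1).foldl (fun D i => pvSet2 D i 0 i) D
  -- for i in range(len(y)+1): D[0][i] = 0
  let D := (PySem.List.pyRange 0 (ys.length + 1) 1).foldl (fun D i => pvSet2 D 0 i 0) D
  -- nested fill loop
  let D := (PySem.List.pyRange 1 (xs.length + 1) 1).foldl (fun D i =>
      (PySem.List.pyRange 1 (ys.length + 1) 1).foldl (fun D j =>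
        let distHor := pvGet2 D i (j - 1) + 1
        let distVer := pvGet2 D (i - 1) j + 1
        let distDiag := if PySem.List.pyGet? xs (i - 1) = PySem.List.pyGet? ys (j - 1)
          then pvGet2 D (i - 1) (j - 1) else pvGet2 D (i - 1) (j - 1) + 1
        pvSet2 D i j (min (min distHor distVer) distDiag)) D) D
  -- return min(D[-1])
  (PySem.List.min? (PySem.List.pyGetD D (-1) []) (fun v => v)).getD 0

-- ===== PORT B =====
-- memoized helper d(i, j): the dict `memo` is threaded through the calls
def pvMemoD (xs ys : List Char) (i j : Nat) (memo : PySem.Dict (Int × Int) Int) :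
    Int × PySem.Dict (Int × Int) Int :=
  match PySem.Dict.get? memo ((i : Int), (j : Int)) with
  | some v => (v, memo)
  | none =>
    if hi : i = 0 then (0, memo.insert ((i : Int), (j : Int)) 0)
    else if hj : j = 0 then ((i : Int), memo.insert ((i : Int), (j : Int)) (i : Int))
    else
      let r1 := pvMemoD xs ys i (j - 1) memo
      let r2 := pvMemoD xs ys (i - 1) j r1.2
      let r3 := pvMemoD xs ys (i - 1) (j - 1) r2.2
      let v := min (min (r1.1 + 1) (r2.1 + 1))
        (r3.1 + (if PySem.List.pyGet? xs ((i : Int) - 1) ≠ PySem.List.pyGet? ys ((j : Int) - 1)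
                 then 1 else 0))
      (v, r3.2.insert ((i : Int), (j : Int)) v)
  termination_by (i, j)
  decreasing_by
  · exact Prod.Lex.right i (by omega)
  · exact Prod.Lex.left _ _ (by omega)
  · exact Prod.Lex.left _ _ (by omega)

def editDistancePinT_alt (x : String) (y : String) : Int :=
  let xs := x.toList
  let ys := y.toList
  -- min(d(len(x), j) for j in range(len(y)+1)), threading the memo left to right
  let fin := (List.range (ys.length + 1)).foldl
    (fun (st : List Int × PySem.Dict (Int × Int) Int) j =>
      let r := pvMemoD xs ys xs.length j st.2
      (st.1 ++ [r.1], r.2))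
    ([], PySem.Dict.empty)
  (PySem.List.min? fin.1 (fun v => v)).getD 0

-- ===== PRECONDITION & SPEC =====
def Spec_editDistancePinT (x : String) (y : String) (out : Int) : Prop := out = editDistancePinT_alt x y
instance (x : String) (y : String) (out : Int) : Decidable (Spec_editDistancePinT x y out) := by unfold Spec_editDistancePinT; infer_instance

-- ===== CLAIM (what is proved, stated in full; the proofs are below) =====
def Claim_equal_editDistancePinT : Prop := ∀ (x : String) (y : String), Dom_editDistancePinT x y → Spec_editDistancePinT x y (editDistancePinT x y)

-- ===== LEMMAS AND PROOFS =====

-- the pure edit-distance recurrence both programs compute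
def pvEd (xs ys : List Char) (i j : Nat) : Int :=
  if i = 0 then 0
  else if j = 0 then (i : Int)
  else
    min (min (pvEd xs ys i (j - 1) + 1) (pvEd xs ys (i - 1) j + 1))
      (pvEd xs ys (i - 1) (j - 1) +
        (if PySem.List.pyGet? xs ((i : Int) - 1) = PySem.List.pyGet? ys ((j : Int) - 1)
         then 0 else 1))
  termination_by (i, j)
  decreasing_by
  · exact Prod.Lex.right i (by omega)
  · exact Prod.Lex.left _ _ (by omega)
  · exact Prod.Lex.left _ _ (by omega)

theorem pvEd_zero (xs ys : List Char) (j : Nat) : pvEd xs ys 0 j = 0 := by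
  rw [pvEd]; simp

theorem pvEd_succ_zero (xs ys : List Char) (i : Nat) : pvEd xs ys (i + 1) 0 = (i : Int) + 1 := by
  rw [pvEd]; simp

theorem pvEd_succ_succ (xs ys : List Char) (i j : Nat) :
    pvEd xs ys (i + 1) (j + 1)
    = min (min (pvEd xs ys (i + 1) j + 1) (pvEd xs ys i (j + 1) + 1))
        (pvEd xs ys i j +
          (if PySem.List.pyGet? xs (i : Int) = PySem.List.pyGet? ys (j : Int) then 0 else 1)) := by
  rw [pvEd]
  have h1 : ((i : Int) + 1 - 1) = (i : Int) := by ring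
  have h2 : ((j : Int) + 1 - 1) = (j : Int) := by ring
  simp [h1, h2]

def pvNextRow (cx : Char) : Int → List Int → List Char → List Int
  | _, _, [] => []
  | _, [], _ :: _ => []
  | last, pj1 :: ptail, cy :: ysr =>
      min (min (last + 1) (ptail.headD 0 + 1)) (pj1 + (if cx = cy then 0 else 1)) ::
      pvNextRow cx (min (min (last + 1) (ptail.headD 0 + 1)) (pj1 + (if cx = cy then 0 else 1))) ptail ysr

def pvRows (ys : List Char) : Int → List Int → List Char → List Int
  | _, prev, [] => prev
  | i, prev, cx :: xsr => pvRows ys (i + 1) (i :: pvNextRow cx i prev ys) xsr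

theorem pvNextRow_length (cx : Char) : ∀ (ys : List Char) (last : Int) (p : List Int),
    p.length = ys.length + 1 → (pvNextRow cx last p ys).length = ys.length := by
  intro ys
  induction ys with
  | nil => intro last p h; simp [pvNextRow]
  | cons cy ysr ih =>
      intro last p h
      match p with
      | pj1 :: ptail =>
          simp only [pvNextRow, List.length_cons]
          rw [ih _ ptail (by simpa using h)]

theorem pvGetD_append_k (q t : List Int) (k : Nat) (d : Int) :
    (q ++ t).getD (q.length + k) d = t.getD k d := by
  simp [List.getD, List.getElem?_append_right (Nat.le_add_right q.length k)]

theorem pvGetD_append_getLast (cur z : List Int) (d : Int) (h : cur ≠ []) :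
    (cur ++ z).getD (cur.length - 1) d = cur.getLast h := by
  have hl : cur.length - 1 < cur.length := by
    cases cur with | nil => simp at h | cons a t => simp
  simp [List.getD, List.getElem?_append_left hl, List.getElem?_eq_getElem hl,
    List.getLast_eq_getElem]

def pvRowsList (ys : List Char) : Int → List Int → List Char → List (List Int)
  | _, _, [] => []
  | i, prev, cx :: xsr =>
      (i :: pvNextRow cx i prev ys) :: pvRowsList ys (i + 1) (i :: pvNextRow cx i prev ys) xsr

def pvStepA (xs ys : List Char) (i : Int) (D : List (List Int)) (j : Int) : List (List Int) :=
  let distHor := pvGet2 D i (j - 1) + 1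
  let distVer := pvGet2 D (i - 1) j + 1
  let distDiag := if PySem.List.pyGet? xs (i - 1) = PySem.List.pyGet? ys (j - 1)
    then pvGet2 D (i - 1) (j - 1) else pvGet2 D (i - 1) (j - 1) + 1
  pvSet2 D i j (min (min distHor distVer) distDiag)

def pvStepAOut (xs ys : List Char) (D : List (List Int)) (i : Int) : List (List Int) :=
  (PySem.List.pyRange 1 (ys.length + 1) 1).foldl (pvStepA xs ys i) D

theorem pvSet_append {α : Type} : ∀ (p : List α) (a b : α) (s : List α),
    (p ++ a :: s).set p.length b = p ++ b :: s := by
  intro p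
  induction p with
  | nil => intro a b s; simp
  | cons x t ih => intro a b s; simp [ih]

theorem pvSet_append2 {α : Type} (P : List α) (a b c : α) (S : List α) :
    (P ++ a :: b :: S).set (P.length + 1) c = P ++ a :: c :: S := by
  have h := pvSet_append (P ++ [a]) b c S
  simp only [List.append_assoc, List.cons_append, List.nil_append, List.length_append,
    List.length_cons, List.length_nil] at h
  exact h

-- A's inner fill loop, related to pvNextRow
theorem pvA_inner (xs ys : List Char) (cx : Char) (P S : List (List Int))
    (hx : PySem.List.pyGet? xs (P.length : Int) = some cx) :
    ∀ (ysu cfx : List Char) (qfx ptail cur : List Int) (hc : cur ≠ []),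
    ys = cfx ++ ysu → cur.length = cfx.length + 1 → qfx.length = cfx.length →
    ptail.length = ysu.length + 1 →
    (PySem.List.pyRange (cur.length : Int) ((ys.length : Int) + 1) 1).foldl
        (pvStepA xs ys ((P.length : Int) + 1))
        (P ++ (qfx ++ ptail) :: (cur ++ List.replicate ysu.length 0) :: S)
    = P ++ (qfx ++ ptail) :: (cur ++ pvNextRow cx (cur.getLast hc) ptail ysu) :: S := by
  intro ysu
  induction ysu with
  | nil =>
      intro cfx qfx ptail cur hc hys hcur hqfx hpt
      have hlen : (cur.length : Int) = (ys.length : Int) + 1 := by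
        rw [hys, hcur]; push_cast; simp
      rw [hlen, PySem.List.pyRange_one_eq_nil (le_refl _)]
      cases ptail <;> simp [pvNextRow]
  | cons cy ysr ih =>
      intro cfx qfx ptail cur hc hys hcur hqfx hpt
      match ptail, hpt with
      | p1 :: ptail', hpt =>
        have hpt' : ptail'.length = ysr.length + 1 := by simpa using hpt
        match ptail', hpt' with
        | p2 :: rest, hpt' =>
          have hyslen : ys.length = cfx.length + ysr.length + 1 := by
            rw [hys]; simp; omega
          have hlt : (cur.length : Int) < (ys.length : Int) + 1 := by
            rw [hcur, hyslen]; push_cast; omega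
          rw [PySem.List.pyRange_one_cons hlt, List.foldl_cons]
          set prevRow := qfx ++ p1 :: p2 :: rest with hprevRow
          set curRow := cur ++ List.replicate (cy :: ysr).length 0 with hcurRow
          set D := P ++ prevRow :: curRow :: S with hD
          have hcast1 : ((cur.length : Int) - 1) = ((cfx.length : Nat) : Int) := by
            rw [hcur]; push_cast; ring
          have hcast2 : ((P.length : Int) + 1) = (((P.length + 1 : Nat)) : Int) := by push_cast; ring
          have hcast3 : ((P.length : Int) + 1 - 1) = ((P.length : Nat) : Int) := by simp
          have hcast4 : ((cur.length : Int)) = (((qfx.length + 1 : Nat)) : Int) := by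
            rw [hcur, hqfx]
          have hrowi : PySem.List.pyGetD D (((P.length + 1 : Nat)) : Int) [] = curRow := by
            rw [PySem.List.pyGetD_natCast, hD]
            simpa using pvGetD_append_k P (prevRow :: curRow :: S) 1 []
          have hrowi1 : PySem.List.pyGetD D ((P.length : Nat) : Int) [] = prevRow := by
            rw [PySem.List.pyGetD_natCast, hD]
            simpa using pvGetD_append_k P (prevRow :: curRow :: S) 0 []
          have hHor : pvGet2 D ((P.length : Int) + 1) ((cur.length : Int) - 1) = cur.getLast hc := by
            rw [pvGet2, hcast1, hcast2, hrowi, PySem.List.pyGetD_natCast, hcurRow]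
            have h5 : cfx.length = cur.length - 1 := by omega
            rw [h5]
            exact pvGetD_append_getLast cur _ 0 hc
          have hVer : pvGet2 D ((P.length : Int) + 1 - 1) ((cur.length : Int)) = p2 := by
            rw [pvGet2, hcast3, hcast4, hrowi1, PySem.List.pyGetD_natCast, hprevRow]
            simpa using pvGetD_append_k qfx (p1 :: p2 :: rest) 1 0
          have hDiag : pvGet2 D ((P.length : Int) + 1 - 1) ((cur.length : Int) - 1) = p1 := by
            rw [pvGet2, hcast3, hcast1, hrowi1, PySem.List.pyGetD_natCast, hprevRow, ← hqfx]
            simpa using pvGetD_append_k qfx (p1 :: p2 :: rest) 0 0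
          have hchar : PySem.List.pyGet? ys ((cur.length : Int) - 1) = some cy := by
            rw [hcast1, hys]
            exact PySem.List.pyGet?_append_length (pre := cfx) (y := cy) (ys := ysr)
          have hcharx : PySem.List.pyGet? xs ((P.length : Int) + 1 - 1) = some cx := by
            rw [hcast3]; exact hx
          set v := min (min (cur.getLast hc + 1) (p2 + 1)) (p1 + (if cx = cy then 0 else 1)) with hv
          have hstep : pvStepA xs ys ((P.length : Int) + 1) D ((cur.length : Int))
              = P ++ prevRow :: ((cur ++ [v]) ++ List.replicate ysr.length 0) :: S := by
            rw [pvStepA]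
            simp only [hHor, hVer, hDiag, hchar, hcharx, Option.some.injEq]
            have hite : (if cx = cy then p1 else p1 + 1) = p1 + (if cx = cy then 0 else 1) := by
              split_ifs <;> ring
            rw [hite, ← hv]
            rw [pvSet2, hcast2, hrowi]
            have hsetrow : PySem.List.pySetD curRow ((cur.length : Int)) v
                = cur ++ v :: List.replicate ysr.length 0 := by
              rw [PySem.List.pySetD_natCast, hcurRow]
              have : List.replicate (cy :: ysr).length (0 : Int) = 0 :: List.replicate ysr.length 0 := by
                simp [List.replicate_succ]
              rw [this]
              exact pvSet_append cur 0 v _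
            rw [hsetrow, PySem.List.pySetD_natCast, hD]
            have := pvSet_append2 P prevRow curRow (cur ++ v :: List.replicate ysr.length 0) S
            simpa using this
          rw [hstep]
          have hrange : ((cur.length : Int) + 1) = (((cur ++ [v]).length : Nat) : Int) := by
            simp
          rw [hrange]
          have hprev2 : prevRow = (qfx ++ [p1]) ++ (p2 :: rest) := by simp [hprevRow]
          rw [hprev2]
          rw [ih (cfx ++ [cy]) (qfx ++ [p1]) (p2 :: rest) (cur ++ [v]) (by simp)
              (by rw [hys]; simp) (by simp [hcur]) (by simp [hqfx]) (by simpa using hpt')]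
          have hgl : (cur ++ [v]).getLast (by simp) = v := by simp
          rw [hgl]
          have hnext : pvNextRow cx (cur.getLast hc) (p1 :: p2 :: rest) (cy :: ysr)
              = v :: pvNextRow cx v (p2 :: rest) ysr := by
            simp only [pvNextRow, List.headD_cons, hv]
          rw [hnext]
          simp

theorem pvBuild {α β : Type} (r : α) : ∀ (l : List β) (acc : List α),
    l.foldl (fun D _ => D ++ [r]) acc = acc ++ List.replicate l.length r := by
  intro l
  induction l with
  | nil => intro acc; simp
  | cons b t ih =>
      intro acc
      rw [List.foldl_cons, ih, List.length_cons, List.replicate_succ]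
      simp

theorem pvSetRep : ∀ (k j : Nat), (List.replicate k (0 : Int)).set j 0 = List.replicate k 0 := by
  intro k
  induction k with
  | zero => intro j; simp
  | succ k ih =>
      intro j
      cases j with
      | zero => simp [List.replicate_succ]
      | succ j => simp [List.replicate_succ, ih]

theorem pvCol0 (n : Nat) : ∀ (m' : Nat) (pfx : List (List Int)),
    (PySem.List.pyRange (pfx.length : Int) ((pfx.length : Int) + (m' : Int)) 1).foldl
      (fun D i => pvSet2 D i 0 i) (pfx ++ List.replicate m' (List.replicate (n + 1) (0 : Int)))
    = pfx ++ (List.range m').map (fun t => ((pfx.length + t : Nat) : Int) :: List.replicate n 0) := by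
  intro m'
  induction m' with
  | zero =>
      intro pfx
      rw [show ((pfx.length : Int) + ((0 : Nat) : Int)) = (pfx.length : Int) by push_cast; ring]
      rw [PySem.List.pyRange_one_eq_nil (le_refl _)]
      simp
  | succ m'' ih =>
      intro pfx
      have hlt : (pfx.length : Int) < (pfx.length : Int) + ((m'' + 1 : Nat) : Int) := by
        push_cast; omega
      rw [PySem.List.pyRange_one_cons hlt, List.foldl_cons]
      have hstep : pvSet2 (pfx ++ List.replicate (m'' + 1) (List.replicate (n + 1) (0 : Int)))
          (pfx.length : Int) 0 (pfx.length : Int)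
          = (pfx ++ [((pfx.length : Nat) : Int) :: List.replicate n 0])
            ++ List.replicate m'' (List.replicate (n + 1) (0 : Int)) := by
        rw [pvSet2, PySem.List.pyGetD_natCast]
        have h1 : (pfx ++ List.replicate (m'' + 1) (List.replicate (n + 1) (0 : Int))).getD pfx.length []
            = List.replicate (n + 1) (0 : Int) := by
          simpa using pvGetD_append_k pfx (List.replicate (m'' + 1) (List.replicate (n + 1) (0 : Int))) 0 []
        rw [h1]
        have h2 : PySem.List.pySetD (List.replicate (n + 1) (0 : Int)) 0 (pfx.length : Int)
            = ((pfx.length : Nat) : Int) :: List.replicate n 0 := by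
          rw [PySem.List.pySetD_of_nonneg _ _ (le_refl (0 : Int))]
          simp [List.replicate_succ]
        rw [h2, PySem.List.pySetD_natCast]
        rw [show List.replicate (m'' + 1) (List.replicate (n + 1) (0 : Int))
            = List.replicate (n + 1) (0 : Int) :: List.replicate m'' (List.replicate (n + 1) (0 : Int)) from by
          simp [List.replicate_succ]]
        rw [pvSet_append]
        simp
      rw [hstep]
      have hrange : ((pfx.length : Int) + 1) = (((pfx ++ [((pfx.length : Nat) : Int) :: List.replicate n 0]).length : Nat) : Int) := by
        simp
      have hbound : ((pfx.length : Int) + ((m'' + 1 : Nat) : Int))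
          = (((pfx ++ [((pfx.length : Nat) : Int) :: List.replicate n 0]).length : Nat) : Int) + ((m'' : Nat) : Int) := by
        push_cast; simp; ring
      rw [hrange, hbound, ih]
      have hmapeq : (List.range m'').map (fun t => (((pfx ++ [((pfx.length : Nat) : Int) :: List.replicate n 0]).length + t : Nat) : Int) :: List.replicate n 0)
          = (List.range m'').map ((fun t => ((pfx.length + t : Nat) : Int) :: List.replicate n 0) ∘ Nat.succ) := by
        apply List.map_congr_left
        intro t _
        simp only [Function.comp_apply, List.length_append, List.length_cons, List.length_nil]
        have h9 : pfx.length + 0 + 1 + t = pfx.length + t.succ := by omega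
        rw [h9]
      rw [List.range_succ_eq_map, List.map_cons, List.map_map, ← hmapeq]
      simp

theorem pvRow0 (n : Nat) : ∀ (l : List Int) (rest : List (List Int)), (∀ i ∈ l, 0 ≤ i) →
    l.foldl (fun D i => pvSet2 D 0 i 0) (List.replicate (n + 1) (0 : Int) :: rest)
    = List.replicate (n + 1) (0 : Int) :: rest := by
  intro l
  induction l with
  | nil => intro rest _; simp
  | cons i t ih =>
      intro rest hpos
      rw [List.foldl_cons]
      have hstep : pvSet2 (List.replicate (n + 1) (0 : Int) :: rest) 0 i 0
          = List.replicate (n + 1) (0 : Int) :: rest := by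
        rw [pvSet2]
        have h0 : PySem.List.pyGetD (List.replicate (n + 1) (0 : Int) :: rest) 0 []
            = List.replicate (n + 1) (0 : Int) := PySem.List.pyGetD_zero_cons _ _ _
        rw [h0]
        have hinner : PySem.List.pySetD (List.replicate (n + 1) (0 : Int)) i 0
            = List.replicate (n + 1) (0 : Int) := by
          rw [PySem.List.pySetD_of_nonneg _ _ (hpos i (by simp))]
          rw [pvSetRep]
        rw [hinner, PySem.List.pySetD_of_nonneg _ _ (le_refl (0 : Int))]
        simp
      rw [hstep]
      exact ih rest (fun j hj => hpos j (by simp [hj]))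

theorem pvA_outer (xs ys : List Char) :
    ∀ (xsu xfx : List Char) (prev : List Int) (P : List (List Int)),
    xs = xfx ++ xsu → P.length = xfx.length → prev.length = ys.length + 1 →
    (PySem.List.pyRange ((xfx.length : Int) + 1) ((xs.length : Int) + 1) 1).foldl
      (pvStepAOut xs ys)
      (P ++ prev :: (List.range xsu.length).map (fun t => ((xfx.length + 1 + t : Nat) : Int) :: List.replicate ys.length 0))
    = P ++ prev :: pvRowsList ys ((xfx.length : Int) + 1) prev xsu := by
  intro xsu
  induction xsu with
  | nil =>
      intro xfx prev P hxs hP hprev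
      have h1 : ((xfx.length : Int) + 1) = ((xs.length : Int) + 1) := by rw [hxs]; simp
      rw [h1, PySem.List.pyRange_one_eq_nil (le_refl _)]
      simp [pvRowsList]
  | cons cx xsr ih =>
      intro xfx prev P hxs hP hprev
      have hxl : xs.length = xfx.length + xsr.length + 1 := by rw [hxs]; simp; omega
      have hlt : ((xfx.length : Int) + 1) < ((xs.length : Int) + 1) := by
        rw [hxl]; push_cast; omega
      rw [PySem.List.pyRange_one_cons hlt, List.foldl_cons]
      simp only [List.length_cons]
      rw [List.range_succ_eq_map, List.map_cons, List.map_map]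
      have hx : PySem.List.pyGet? xs ((P.length : Int)) = some cx := by
        rw [hP, hxs]
        exact PySem.List.pyGet?_append_length (pre := xfx) (y := cx) (ys := xsr)
      have hi : ((xfx.length : Int) + 1) = ((P.length : Int) + 1) := by rw [hP]
      set M := (List.range xsr.length).map ((fun t => ((xfx.length + 1 + t : Nat) : Int) :: List.replicate ys.length 0) ∘ Nat.succ) with hM
      have hrow0 : (((xfx.length + 1 + 0 : Nat)) : Int) :: List.replicate ys.length (0 : Int)
          = ([(P.length : Int) + 1] : List Int) ++ List.replicate ys.length 0 := by
        rw [hP]; push_cast; simp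
      have hstep : pvStepAOut xs ys
          (P ++ prev :: ((((xfx.length + 1 + 0 : Nat)) : Int) :: List.replicate ys.length 0) :: M)
          ((xfx.length : Int) + 1)
          = P ++ prev :: (((P.length : Int) + 1) :: pvNextRow cx ((P.length : Int) + 1) prev ys) :: M := by
        rw [pvStepAOut, hi, hrow0]
        have hin := pvA_inner xs ys cx P M hx ys [] [] prev [(P.length : Int) + 1]
          (by simp) (by simp) (by simp) (by simp) hprev
        simp only [List.length_cons, List.length_nil, List.nil_append, Nat.zero_add,
          Nat.cast_one, List.getLast_singleton] at hin
        rw [hin]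
        simp
      rw [hstep]
      have hmapeq2 : M
          = (List.range xsr.length).map (fun t => (((xfx ++ [cx]).length + 1 + t : Nat) : Int) :: List.replicate ys.length 0) := by
        rw [hM]
        apply List.map_congr_left
        intro t _
        simp only [Function.comp_apply, List.length_append, List.length_cons, List.length_nil]
        congr 2
        omega
      have hr2 : ((xfx.length : Int) + 1 + 1) = (((xfx ++ [cx]).length : Nat) : Int) + 1 := by
        simp
      have hmat : P ++ prev :: (((P.length : Int) + 1) :: pvNextRow cx ((P.length : Int) + 1) prev ys) :: M
          = (P ++ [prev]) ++ (((P.length : Int) + 1) :: pvNextRow cx ((P.length : Int) + 1) prev ys)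
            :: (List.range xsr.length).map (fun t => (((xfx ++ [cx]).length + 1 + t : Nat) : Int) :: List.replicate ys.length 0) := by
        rw [← hmapeq2]
        simp
      rw [hr2, hmat]
      rw [ih (xfx ++ [cx]) _ (P ++ [prev]) (by rw [hxs]; simp) (by simp [hP])
          (by simp [pvNextRow_length cx ys _ prev hprev])]
      have hii : (((xfx ++ [cx]).length : Nat) : Int) = (P.length : Int) + 1 := by
        rw [hP]; simp
      rw [hii, ← hi]
      simp [pvRowsList]

theorem pvRowsList_getLast (ys : List Char) : ∀ (xsu : List Char) (i : Int) (prev : List Int),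
    (prev :: pvRowsList ys i prev xsu).getLast (by simp) = pvRows ys i prev xsu := by
  intro xsu
  induction xsu with
  | nil => intro i prev; simp [pvRowsList, pvRows]
  | cons cx xsr ih =>
      intro i prev
      simp only [pvRowsList, pvRows]
      rw [List.getLast_cons (by simp)]
      exact ih (i + 1) (i :: pvNextRow cx i prev ys)

theorem pvA_eq (x y : String) : editDistancePinT x y =
    (PySem.List.min? (pvRows y.toList 1 (List.replicate (y.toList.length + 1) 0) x.toList) (fun v => v)).getD 0 := by
  have h1 : editDistancePinT x y =
      (PySem.List.min? (PySem.List.pyGetD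
        ((PySem.List.pyRange 1 ((x.toList.length : Int) + 1) 1).foldl (pvStepAOut x.toList y.toList)
          ((PySem.List.pyRange 0 ((y.toList.length : Int) + 1) 1).foldl (fun D i => pvSet2 D 0 i 0)
            ((PySem.List.pyRange 0 ((x.toList.length : Int) + 1) 1).foldl (fun D i => pvSet2 D i 0 i)
              ((PySem.List.pyRange 0 ((x.toList.length : Int) + 1) 1).foldl
                (fun D _ => D ++ [List.replicate (y.toList.length + 1) (0 : Int)]) []))))
        (-1) []) (fun v => v)).getD 0 := rfl
  rw [h1]
  set xs := x.toList
  set ys := y.toList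
  rw [pvBuild]
  have hlen1 : (PySem.List.pyRange 0 ((xs.length : Int) + 1) 1).length = xs.length + 1 := by
    rw [PySem.List.length_pyRange_one]; omega
  rw [hlen1, List.nil_append]
  have hc := pvCol0 ys.length (xs.length + 1) []
  simp only [List.length_nil, Nat.cast_zero, zero_add, List.nil_append, Nat.cast_add,
    Nat.cast_one] at hc
  rw [hc]
  rw [List.range_succ_eq_map, List.map_cons, List.map_map]
  simp only [Nat.cast_zero]
  rw [← List.replicate_succ]
  rw [pvRow0 ys.length _ _ (by
    intro i hi
    have := (PySem.List.mem_pyRange_one.mp hi).1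
    omega)]
  have hmap : (List.range xs.length).map ((fun t => ((t : Nat) : Int) :: List.replicate ys.length 0) ∘ Nat.succ)
      = (List.range xs.length).map (fun t => ((0 + 1 + t : Nat) : Int) :: List.replicate ys.length 0) := by
    apply List.map_congr_left
    intro t _
    simp only [Function.comp_apply]
    congr 2
    omega
  rw [hmap]
  have hao := pvA_outer xs ys xs [] (List.replicate (ys.length + 1) (0 : Int)) []
    (by simp) (by simp) (by simp)
  simp only [List.length_nil, Nat.cast_zero, zero_add, List.nil_append] at hao
  rw [hao]
  have hne : (List.replicate (ys.length + 1) (0 : Int)) :: pvRowsList ys 1 (List.replicate (ys.length + 1) (0 : Int)) xs ≠ [] := by simp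
  rw [PySem.List.pyGetD_neg_one _ [] hne]
  rw [pvRowsList_getLast ys xs 1 (List.replicate (ys.length + 1) (0 : Int))]

-- ---- relating A's rolling rows to the pure recurrence pvEd ----

theorem pvNextRow_ed (xs ys : List Char) (cx : Char) (i : Nat)
    (hx : PySem.List.pyGet? xs (i : Int) = some cx) :
    ∀ (ysu cfx : List Char), ys = cfx ++ ysu →
    pvNextRow cx (pvEd xs ys (i + 1) cfx.length)
      ((List.range (ysu.length + 1)).map (fun t => pvEd xs ys i (cfx.length + t))) ysu
    = (List.range ysu.length).map (fun t => pvEd xs ys (i + 1) (cfx.length + 1 + t)) := by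
  intro ysu
  induction ysu with
  | nil =>
      intro cfx h
      simp [pvNextRow]
  | cons cy ysr ih =>
      intro cfx h
      have hyc : PySem.List.pyGet? ys (cfx.length : Int) = some cy := by
        rw [h]
        exact PySem.List.pyGet?_append_length (pre := cfx) (y := cy) (ys := ysr)
      have hP : (List.range (ysr.length + 1 + 1)).map (fun t => pvEd xs ys i (cfx.length + t))
          = pvEd xs ys i cfx.length
            :: (List.range (ysr.length + 1)).map (fun t => pvEd xs ys i (cfx.length + 1 + t)) := by
        rw [List.range_succ_eq_map, List.map_cons, List.map_map]
        refine congrArg₂ List.cons (by congr 1) ?_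
        apply List.map_congr_left
        intro t _
        simp only [Function.comp_apply]
        congr 1
        omega
      rw [List.length_cons, hP]
      simp only [pvNextRow]
      have hhead : ((List.range (ysr.length + 1)).map
            (fun t => pvEd xs ys i (cfx.length + 1 + t))).headD 0
          = pvEd xs ys i (cfx.length + 1) := by
        rw [List.range_succ_eq_map]
        simp
      rw [hhead]
      have hv : min (min (pvEd xs ys (i + 1) cfx.length + 1) (pvEd xs ys i (cfx.length + 1) + 1))
            (pvEd xs ys i cfx.length + (if cx = cy then 0 else 1))
          = pvEd xs ys (i + 1) (cfx.length + 1) := by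
        rw [pvEd_succ_succ xs ys i cfx.length, hx, hyc]
        simp
      rw [hv]
      have hR : (List.range (ysr.length + 1)).map (fun t => pvEd xs ys (i + 1) (cfx.length + 1 + t))
          = pvEd xs ys (i + 1) (cfx.length + 1)
            :: (List.range ysr.length).map (fun t => pvEd xs ys (i + 1) (cfx.length + 1 + 1 + t)) := by
        rw [List.range_succ_eq_map, List.map_cons, List.map_map]
        refine congrArg₂ List.cons (by congr 1) ?_
        apply List.map_congr_left
        intro t _
        simp only [Function.comp_apply]
        congr 1
        omega
      rw [hR]
      refine congrArg₂ List.cons rfl ?_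
      have hih := ih (cfx ++ [cy]) (by rw [h]; simp)
      simp only [List.length_append, List.length_cons, List.length_nil, Nat.zero_add] at hih
      exact hih

theorem pvRows_ed (xs ys : List Char) :
    ∀ (xsu xfx : List Char), xs = xfx ++ xsu →
    pvRows ys ((xfx.length : Int) + 1)
      ((List.range (ys.length + 1)).map (fun t => pvEd xs ys xfx.length t)) xsu
    = (List.range (ys.length + 1)).map (fun t => pvEd xs ys xs.length t) := by
  intro xsu
  induction xsu with
  | nil =>
      intro xfx h
      have hx : xfx = xs := by rw [h, List.append_nil]
      rw [hx, pvRows]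
  | cons cx xsr ih =>
      intro xfx h
      rw [pvRows]
      have hx : PySem.List.pyGet? xs (xfx.length : Int) = some cx := by
        rw [h]
        exact PySem.List.pyGet?_append_length (pre := xfx) (y := cx) (ys := xsr)
      have hnr := pvNextRow_ed xs ys cx xfx.length hx ys [] rfl
      simp only [List.length_nil, Nat.zero_add] at hnr
      have hlast : ((xfx.length : Int) + 1) = pvEd xs ys (xfx.length + 1) 0 := by
        rw [pvEd_succ_zero]
      have hrow : (((xfx.length : Int) + 1) :: pvNextRow cx ((xfx.length : Int) + 1)
            ((List.range (ys.length + 1)).map (fun t => pvEd xs ys xfx.length t)) ys)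
          = (List.range (ys.length + 1)).map (fun t => pvEd xs ys (xfx.length + 1) t) := by
        rw [hlast, hnr]
        rw [List.range_succ_eq_map, List.map_cons, List.map_map]
        refine congrArg₂ List.cons rfl ?_
        apply List.map_congr_left
        intro t _
        simp only [Function.comp_apply]
        congr 1
        omega
      rw [hrow]
      have hcast : ((xfx.length : Int) + 1 + 1) = (((xfx ++ [cx]).length : Nat) : Int) + 1 := by
        simp
      rw [hcast]
      have hih := ih (xfx ++ [cx]) (by rw [h]; simp)
      simp only [List.length_append, List.length_cons, List.length_nil] at hih
      simpa using hih

-- ---- B's memoized recursion computes pvEd ----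

def pvGood (xs ys : List Char) (memo : PySem.Dict (Int × Int) Int) : Prop :=
  ∀ (i j : Nat) (v : Int), PySem.Dict.get? memo ((i : Int), (j : Int)) = some v → v = pvEd xs ys i j

theorem pvGood_insert (xs ys : List Char) (memo : PySem.Dict (Int × Int) Int)
    (i j : Nat) (v : Int) (hg : pvGood xs ys memo) (hv : v = pvEd xs ys i j) :
    pvGood xs ys (memo.insert ((i : Int), (j : Int)) v) := by
  intro i' j' w hw
  rw [PySem.Dict.get?_insert] at hw
  by_cases hk : ((i' : Int), (j' : Int)) = ((i : Int), (j : Int))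
  · rw [if_pos hk] at hw
    rw [Prod.mk.injEq] at hk
    have hi : i' = i := by exact_mod_cast hk.1
    have hj : j' = j := by exact_mod_cast hk.2
    cases hw
    rw [hi, hj]
    exact hv
  · rw [if_neg hk] at hw
    exact hg i' j' w hw

theorem pvMemoD_good (xs ys : List Char) : ∀ (n i j : Nat), i + j ≤ n →
    ∀ (memo : PySem.Dict (Int × Int) Int), pvGood xs ys memo →
    (pvMemoD xs ys i j memo).1 = pvEd xs ys i j ∧ pvGood xs ys (pvMemoD xs ys i j memo).2 := by
  intro n
  induction n with
  | zero =>
      intro i j hle memo hg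
      have hi : i = 0 := by omega
      have hj : j = 0 := by omega
      subst hi; subst hj
      rw [pvMemoD]
      cases hget : PySem.Dict.get? memo (((0 : Nat) : Int), ((0 : Nat) : Int)) with
      | some v =>
          simp only []
          exact ⟨hg 0 0 v hget, hg⟩
      | none =>
          rw [dif_pos (by trivial)]
          refine ⟨by rw [pvEd_zero], ?_⟩
          exact pvGood_insert xs ys memo 0 0 0 hg (by rw [pvEd_zero])
  | succ n ihn =>
      intro i j hle memo hg
      rw [pvMemoD]
      cases hget : PySem.Dict.get? memo ((i : Int), (j : Int)) with
      | some v =>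
          simp only []
          exact ⟨hg i j v hget, hg⟩
      | none =>
          by_cases hi : i = 0
          · simp only [dif_pos hi]
            subst hi
            refine ⟨by rw [pvEd_zero], ?_⟩
            exact pvGood_insert xs ys memo 0 j 0 hg (by rw [pvEd_zero])
          · simp only [dif_neg hi]
            by_cases hj : j = 0
            · simp only [dif_pos hj]
              subst hj
              obtain ⟨i', rfl⟩ : ∃ i', i = i' + 1 := ⟨i - 1, by omega⟩
              refine ⟨?_, ?_⟩
              · rw [pvEd_succ_zero]; push_cast; ring
              · exact pvGood_insert xs ys memo (i' + 1) 0 ((i' : Int) + 1) hg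
                  (by rw [pvEd_succ_zero])
            · simp only [dif_neg hj]
              obtain ⟨i', rfl⟩ : ∃ i', i = i' + 1 := ⟨i - 1, by omega⟩
              obtain ⟨j', rfl⟩ : ∃ j', j = j' + 1 := ⟨j - 1, by omega⟩
              have h1 := ihn (i' + 1) j' (by omega) memo hg
              have h2 := ihn i' (j' + 1) (by omega) _ h1.2
              have h3 := ihn i' j' (by omega) _ h2.2
              simp only [Nat.add_sub_cancel]
              refine ⟨?_, ?_⟩
              · rw [h1.1, h2.1, h3.1]
                rw [pvEd_succ_succ]
                have hc1 : (((i' + 1 : Nat) : Int) - 1) = (i' : Int) := by push_cast; ring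
                have hc2 : (((j' + 1 : Nat) : Int) - 1) = (j' : Int) := by push_cast; ring
                rw [hc1, hc2]
                congr 1
                by_cases hcc : PySem.List.pyGet? xs (i' : Int) = PySem.List.pyGet? ys (j' : Int)
                · rw [if_pos hcc, if_neg (by simpa using hcc)]
                · rw [if_neg hcc, if_pos (by simpa using hcc)]
              · apply pvGood_insert xs ys _ (i' + 1) (j' + 1) _ h3.2
                rw [h1.1, h2.1, h3.1]
                rw [pvEd_succ_succ]
                have hc1 : (((i' + 1 : Nat) : Int) - 1) = (i' : Int) := by push_cast; ring
                have hc2 : (((j' + 1 : Nat) : Int) - 1) = (j' : Int) := by push_cast; ring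
                rw [hc1, hc2]
                congr 1
                by_cases hcc : PySem.List.pyGet? xs (i' : Int) = PySem.List.pyGet? ys (j' : Int)
                · rw [if_pos hcc, if_neg (by simpa using hcc)]
                · rw [if_neg hcc, if_pos (by simpa using hcc)]

theorem pvB_fold (xs ys : List Char) (m : Nat) :
    ∀ (l : List Nat) (acc : List Int) (memo : PySem.Dict (Int × Int) Int), pvGood xs ys memo →
    ((l.foldl (fun (st : List Int × PySem.Dict (Int × Int) Int) j =>
        (st.1 ++ [(pvMemoD xs ys m j st.2).1], (pvMemoD xs ys m j st.2).2)) (acc, memo)).1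
      = acc ++ l.map (fun j => pvEd xs ys m j))
    ∧ pvGood xs ys ((l.foldl (fun (st : List Int × PySem.Dict (Int × Int) Int) j =>
        (st.1 ++ [(pvMemoD xs ys m j st.2).1], (pvMemoD xs ys m j st.2).2)) (acc, memo)).2) := by
  intro l
  induction l with
  | nil =>
      intro acc memo hg
      refine ⟨by simp, ?_⟩
      simp only [List.foldl_nil]
      exact hg
  | cons j t ih =>
      intro acc memo hg
      rw [List.foldl_cons]
      have h := pvMemoD_good xs ys (m + j) m j (le_refl _) memo hg
      have := ih (acc ++ [(pvMemoD xs ys m j memo).1]) (pvMemoD xs ys m j memo).2 h.2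
      refine ⟨?_, this.2⟩
      rw [this.1, h.1]
      simp

theorem pvGood_empty (xs ys : List Char) : pvGood xs ys PySem.Dict.empty := by
  intro i j v h
  rw [PySem.Dict.get?_empty] at h
  cases h

theorem pvB_eq (x y : String) : editDistancePinT_alt x y =
    (PySem.List.min? ((List.range (y.toList.length + 1)).map
      (fun j => pvEd x.toList y.toList x.toList.length j)) (fun v => v)).getD 0 := by
  have h1 : editDistancePinT_alt x y =
      (PySem.List.min? (((List.range (y.toList.length + 1)).foldl
        (fun (st : List Int × PySem.Dict (Int × Int) Int) j =>
          (st.1 ++ [(pvMemoD x.toList y.toList x.toList.length j st.2).1],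
           (pvMemoD x.toList y.toList x.toList.length j st.2).2))
        ([], PySem.Dict.empty)).1) (fun v => v)).getD 0 := rfl
  rw [h1]
  rw [(pvB_fold x.toList y.toList x.toList.length (List.range (y.toList.length + 1)) []
    PySem.Dict.empty (pvGood_empty _ _)).1]
  simp

theorem pvRow_zero_replicate (xs ys : List Char) (n : Nat) :
    (List.range (n + 1)).map (fun t => pvEd xs ys 0 t) = List.replicate (n + 1) (0 : Int) := by
  rw [List.eq_replicate_iff]
  constructor
  · simp
  · intro b hb
    obtain ⟨t, _, rfl⟩ := List.mem_map.mp hb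
    exact pvEd_zero xs ys t

-- ===== VERDICT (by name: the statement is the Claim_ definition above) =====
theorem editDistancePinT_spec : Claim_equal_editDistancePinT := by
  intro x y _
  unfold Spec_editDistancePinT
  rw [pvA_eq, pvB_eq]
  have h := pvRows_ed x.toList y.toList x.toList []  (by simp)
  simp only [List.length_nil, Nat.cast_zero, zero_add] at h
  rw [pvRow_zero_replicate x.toList y.toList y.toList.length] at h
  rw [← h]
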